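-- pv_equiv track=rewrite | github.com/lxhoanghsgs/Calculations-on-Whitehead-graphs | Operations_on_Incidence_matrix_of_Wgraphs_with_STRONG_imposes.py | get_edge_pairing_of_single_word
-- ===== SOURCE A (Python) =====
-- def get_length_two_subwords(list_of_words: list) -> list:
--     list_of_length_two_subwords = []
--     for i in list_of_words:
--         for j in range(-1, len(i)-1):
--             list_of_length_two_subwords.append(i[j] + i[j+1])
--     return list_of_length_two_subwords
--
-- def get_edge_pairing_of_single_word(word: str, w_index: int) -> dict:
--     dict_of_edge_pairing = {"a": [], "b": [], "c": []}
--     l = get_length_two_subwords([word,])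
--     for i in range(len(l) - 1):
--         if l[i][1].islower():
--             dict_of_edge_pairing[l[i][1]].append((i+1 + w_index, i + w_index))
--         else:
--             m = l[i][1].lower()
--             dict_of_edge_pairing[m].append((i + w_index, i+1 + w_index))
--     if l[-1][1].islower():
--         dict_of_edge_pairing[l[-1][1]].append((w_index, len(l) - 1 + w_index))
--     else:
--         m = l[-1][1].lower()
--         dict_of_edge_pairing[m].append((len(l) - 1 + w_index, w_index))
--     return dict_of_edge_pairing
-- ===== SOURCE B (Python) =====
-- def get_edge_pairing_of_single_word(word: str, w_index: int) -> dict: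
--     dict_of_edge_pairing = {"a": [], "b": [], "c": []}
--     n = len(word)
--     for i in range(n):
--         c = word[i]
--         nxt = (i + 1) % n
--         if c.islower():
--             dict_of_edge_pairing[c].append((nxt + w_index, i + w_index))
--         else:
--             dict_of_edge_pairing[c.lower()].append((i + w_index, nxt + w_index))
--     return dict_of_edge_pairing
-- ===== Notes on version B (the rewrite author's own statement) =====
-- stated objective: simpler
-- what changed: Drops the get_length_two_subwords helper and the intermediate list of two-letter subwords: a single modular-index loop over the word (nxt = (i+1) % n) handles the wrap-around that A treated as a special final element after building the subword list.
-- crash fix: On the empty word A raises IndexError (l[-1] on the empty subword list) while B's loop simply never runs and returns {'a': [], 'b': [], 'c': []}. — e.g. on get_edge_pairing_of_single_word("", 0): A raises IndexError, B returns [("a", []), ("b", []), ("c", [])]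
import Mathlib
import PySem

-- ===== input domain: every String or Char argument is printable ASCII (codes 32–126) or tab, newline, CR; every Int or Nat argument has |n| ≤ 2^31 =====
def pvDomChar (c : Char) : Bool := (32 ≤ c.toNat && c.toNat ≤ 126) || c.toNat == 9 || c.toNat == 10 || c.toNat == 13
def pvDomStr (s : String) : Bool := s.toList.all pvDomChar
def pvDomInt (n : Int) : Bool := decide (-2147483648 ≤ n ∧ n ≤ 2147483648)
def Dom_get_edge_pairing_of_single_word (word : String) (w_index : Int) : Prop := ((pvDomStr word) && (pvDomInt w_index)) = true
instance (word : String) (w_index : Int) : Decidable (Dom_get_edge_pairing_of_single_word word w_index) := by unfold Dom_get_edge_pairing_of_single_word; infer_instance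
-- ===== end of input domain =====

-- B replaces A's intermediate list of two-letter subwords by a single modular-index loop over the word (same cost, plainer).

-- ===== PORT A =====
def get_length_two_subwords (list_of_words : List String) : List (List Char) :=
  list_of_words.foldl (fun acc i =>
    (PySem.List.pyRange (-1) (PySem.Str.len i - 1) 1).foldl
      (fun acc2 j =>
        acc2 ++ [[PySem.List.pyGetD i.toList j 'a', PySem.List.pyGetD i.toList (j + 1) 'a']]) acc) []

def get_edge_pairing_of_single_word (word : String) (w_index : Int) : List (String × List (Int × Int)) :=
  let d0 : PySem.Dict String (List (Int × Int)) := PySem.Dict.ofList [("a", []), ("b", []), ("c", [])]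
  let l := get_length_two_subwords [word]
  let d1 := (PySem.List.pyRange 0 ((l.length : Int) - 1) 1).foldl (fun d i =>
      let c := PySem.List.pyGetD (PySem.List.pyGetD l i []) 1 'a'
      if PySem.Chars.islower c then
        d.modify (String.ofList [c]) [] (fun v => v ++ [(i + 1 + w_index, i + w_index)])
      else
        d.modify (String.ofList [PySem.Chars.lowerChar c]) [] (fun v => v ++ [(i + w_index, i + 1 + w_index)])) d0
  let c := PySem.List.pyGetD (PySem.List.pyGetD l (-1) []) 1 'a'
  let d2 := if PySem.Chars.islower c then
        d1.modify (String.ofList [c]) [] (fun v => v ++ [(w_index, (l.length : Int) - 1 + w_index)])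
      else
        d1.modify (String.ofList [PySem.Chars.lowerChar c]) [] (fun v => v ++ [((l.length : Int) - 1 + w_index, w_index)])
  d2.items

-- ===== PORT B =====
def get_edge_pairing_of_single_word_alt (word : String) (w_index : Int) : List (String × List (Int × Int)) :=
  let n : Int := PySem.Str.len word
  let d := (PySem.List.pyRange 0 n 1).foldl (fun d i =>
      let c := PySem.List.pyGetD word.toList i 'a'
      let nxt := PySem.Int.mod (i + 1) n
      if PySem.Chars.islower c then
        d.modify (String.ofList [c]) [] (fun v => v ++ [(nxt + w_index, i + w_index)])
      else
        d.modify (String.ofList [PySem.Chars.lowerChar c]) [] (fun v => v ++ [(i + w_index, nxt + w_index)]))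
    (PySem.Dict.ofList [("a", []), ("b", []), ("c", [])])
  d.items

-- ===== PRECONDITION & SPEC =====
-- Pre_ = exactly where Python A returns: nonempty word (else IndexError on l[-1]) whose letters all
-- lowercase to 'a'/'b'/'c' (else KeyError on the three-key dict).
def Pre_get_edge_pairing_of_single_word (word : String) (_w_index : Int) : Prop :=
  word.toList ≠ [] ∧ (word.toList.all (fun c =>
    PySem.Chars.lowerChar c == 'a' || PySem.Chars.lowerChar c == 'b' || PySem.Chars.lowerChar c == 'c')) = true
instance (word : String) (w_index : Int) : Decidable (Pre_get_edge_pairing_of_single_word word w_index) := by unfold Pre_get_edge_pairing_of_single_word; infer_instance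

def pvWitness_get_edge_pairing_of_single_word : String × Int := ("aBcb", 3)

-- On the empty word A raises IndexError (l[-1] on the empty subword list) while B returns the base dict
-- (proved below as get_edge_pairing_of_single_word_raises).
def Raises_get_edge_pairing_of_single_word (word : String) (_w_index : Int) : Prop := word.toList = []
instance (word : String) (w_index : Int) : Decidable (Raises_get_edge_pairing_of_single_word word w_index) := by unfold Raises_get_edge_pairing_of_single_word; infer_instance
def pvRaiseWitness_get_edge_pairing_of_single_word : String × Int := ("", 0)
def pvRaiseWitnessOut_get_edge_pairing_of_single_word : List (String × List (Int × Int)) := [("a", []), ("b", []), ("c", [])]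

def Spec_get_edge_pairing_of_single_word (word : String) (w_index : Int) (out : List (String × List (Int × Int))) : Prop := out = get_edge_pairing_of_single_word_alt word w_index
instance (word : String) (w_index : Int) (out : List (String × List (Int × Int))) : Decidable (Spec_get_edge_pairing_of_single_word word w_index out) := by unfold Spec_get_edge_pairing_of_single_word; infer_instance

-- ===== CLAIM (what is proved, stated in full; the proofs are below) =====
def Claim_equal_get_edge_pairing_of_single_word : Prop := ∀ (word : String) (w_index : Int), Dom_get_edge_pairing_of_single_word word w_index → Pre_get_edge_pairing_of_single_word word w_index → Spec_get_edge_pairing_of_single_word word w_index (get_edge_pairing_of_single_word word w_index)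
def Claim_raises_get_edge_pairing_of_single_word : Prop := (∀ (word : String) (w_index : Int), Dom_get_edge_pairing_of_single_word word w_index → Raises_get_edge_pairing_of_single_word word w_index → ¬ Pre_get_edge_pairing_of_single_word word w_index) ∧ (Dom_get_edge_pairing_of_single_word (pvRaiseWitness_get_edge_pairing_of_single_word.1) (pvRaiseWitness_get_edge_pairing_of_single_word.2) ∧ Raises_get_edge_pairing_of_single_word (pvRaiseWitness_get_edge_pairing_of_single_word.1) (pvRaiseWitness_get_edge_pairing_of_single_word.2) ∧ get_edge_pairing_of_single_word_alt (pvRaiseWitness_get_edge_pairing_of_single_word.1) (pvRaiseWitness_get_edge_pairing_of_single_word.2) = pvRaiseWitnessOut_get_edge_pairing_of_single_word)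

-- ===== LEMMAS AND PROOFS =====

theorem flatten_map_singleton {α β : Type} (l : List α) (f : α → β) :
    (List.map (fun x => [f x]) l).flatten = List.map f l := by
  induction l with
  | nil => simp
  | cons x xs ih => simp [ih]

theorem key_hl (word : String) :
    get_length_two_subwords [word] =
      (PySem.List.pyRange (-1) ((word.toList.length : Int) - 1) 1).map
        (fun j => [PySem.List.pyGetD word.toList j 'a', PySem.List.pyGetD word.toList (j + 1) 'a']) := by
  simp [get_length_two_subwords, PySem.Str.len_eq, flatten_map_singleton]

theorem key_equiv (word : String) (w_index : Int) (h : word.toList ≠ []) :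
    get_edge_pairing_of_single_word word w_index = get_edge_pairing_of_single_word_alt word w_index := by
  have hNpos : 0 < word.toList.length := List.length_pos_iff.mpr h
  have hN1 : (1 : Int) ≤ (word.toList.length : Int) := by exact_mod_cast hNpos
  set N : Int := (word.toList.length : Int) with hNdef
  set cs : List Char := word.toList with hcs
  set f : Int → List Char := fun j => [PySem.List.pyGetD cs j 'a', PySem.List.pyGetD cs (j + 1) 'a'] with hf
  have hlen : (((PySem.List.pyRange (-1) (N - 1) 1).map f).length : Int) = N := by
    simp [PySem.List.length_pyRange_one]; omega
  simp only [get_edge_pairing_of_single_word, get_edge_pairing_of_single_word_alt,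
    key_hl, PySem.Str.len_eq, ← hcs, ← hNdef, ← hf, hlen]
  have pg2 : ∀ x y : Char, PySem.List.pyGetD [x, y] 1 'a' = y := fun _ _ => rfl
  have hmid : ∀ i : Int, 0 ≤ i → i < N - 1 →
      PySem.List.pyGetD (PySem.List.pyGetD ((PySem.List.pyRange (-1) (N - 1) 1).map f) i []) 1 'a' =
        PySem.List.pyGetD cs i 'a' := by
    intro i h0 hlt
    obtain ⟨k, rfl⟩ := Int.le.dest h0
    simp only [zero_add] at hlt ⊢
    rw [PySem.List.pyGetD_map_pyRange_one f (-1) (N - 1) k [] (by omega)]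
    simp only [hf, pg2]
    rw [show (-1 + (k : Int) + 1) = (k : Int) by ring]
  have hlast : PySem.List.pyGetD (PySem.List.pyGetD ((PySem.List.pyRange (-1) (N - 1) 1).map f) (-1) []) 1 'a' =
      PySem.List.pyGetD cs (N - 1) 'a' := by
    have hsp : PySem.List.pyRange (-1) (N - 1) 1 = PySem.List.pyRange (-1) (N - 2) 1 ++ [N - 2] := by
      have h2 := PySem.List.pyRange_one_succ_right (a := -1) (b := N - 2) (by omega)
      rw [show N - 2 + 1 = N - 1 by ring] at h2
      exact h2
    rw [hsp]
    rw [List.map_append, List.map_singleton, PySem.List.pyGetD_neg_one_append_singleton]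
    simp only [hf, pg2]
    rw [show N - 2 + 1 = N - 1 by ring]
  have hmodN : PySem.Int.mod (N - 1 + 1) N = 0 := by
    rw [show N - 1 + 1 = N by ring, PySem.Int.mod_eq_emod_of_pos (by omega)]
    exact Int.emod_self
  have hmods : ∀ i : Int, 0 ≤ i → i < N - 1 → PySem.Int.mod (i + 1) N = i + 1 := by
    intro i h0 hlt
    rw [PySem.Int.mod_eq_emod_of_pos (by omega)]
    exact Int.emod_eq_of_lt (by omega) (by omega)
  have hsplit : PySem.List.pyRange 0 N 1 = PySem.List.pyRange 0 (N - 1) 1 ++ [N - 1] := by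
    have h2 := PySem.List.pyRange_one_succ_right (a := 0) (b := N - 1) (by omega)
    rw [show N - 1 + 1 = N by ring] at h2
    exact h2
  rw [hsplit]
  rw [List.foldl_append]
  simp only [List.foldl_cons, List.foldl_nil]
  rw [hlast, hmodN]
  simp only [zero_add]
  congr 1
  split_ifs with hc
  all_goals {
    congr 1
    apply PySem.List.foldl_congr_mem
    intro acc i hi
    obtain ⟨h0, hlt⟩ := (PySem.List.mem_pyRange_one).mp hi
    rw [hmid i h0 hlt, hmods i h0 hlt]
  }

-- ===== VERDICT (by name: the statement is the Claim_ definition above) =====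
theorem get_edge_pairing_of_single_word_spec : Claim_equal_get_edge_pairing_of_single_word := by
  intro word w_index _ hpre
  exact key_equiv word w_index hpre.1

@[simp] theorem get_edge_pairing_of_single_word_raises : Claim_raises_get_edge_pairing_of_single_word := by
  unfold Claim_raises_get_edge_pairing_of_single_word
  exact ⟨fun word w_index _ hr hp => hp.1 hr, by decide⟩
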